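-- pv_equiv track=rewrite | github.com/Ali-932/manhwa_maker | utils.py | print_level_image_crop_calculator
-- ===== SOURCE A (Python) =====
-- def print_level_image_crop_calculator(manhwa_crop_list, image_side_pixel_count=2300):
--     side_length = 0
--     for image in manhwa_crop_list:
--         for i, cut_pixels in enumerate(image):
--             side_length += cut_pixels[1] - cut_pixels[0]
--             if side_length > image_side_pixel_count:
--                 cut_pixels = (
--                     cut_pixels[0],
--                     cut_pixels[0] + image_side_pixel_count - (side_length - (cut_pixels[1] - cut_pixels[0]))
--                 )
--                 old_cut_pixels = image[i]
--                 image[i] = cut_pixels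
--
--                 side_length = 0
--                 image.insert(i + 1, (image[i][1], old_cut_pixels[1]))
--     return manhwa_crop_list
-- ===== SOURCE B (Python) =====
-- def print_level_image_crop_calculator(manhwa_crop_list, image_side_pixel_count=2300):
--     side_length = 0
--     for image in manhwa_crop_list:
--         out = []
--         for seg in image:
--             start, end = seg[0], seg[1]
--             while True:
--                 side_length += end - start
--                 if side_length > image_side_pixel_count:
--                     cut = start + image_side_pixel_count - (side_length - (end - start))
--                     out.append((start, cut))
--                     side_length = 0
--                     start = cut
--                 else:
--                     out.append(seg if start == seg[0] else (start, end))
--                     break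
--         image[:] = out
--     return manhwa_crop_list
-- ===== Notes on version B (the rewrite author's own statement) =====
-- stated objective: alternative
-- what changed: Replaces A's insert-into-the-list-being-iterated (mutating image with image.insert(i+1,...) so the for loop re-visits the inserted remainder) by an explicit inner split-while-loop per original interval that builds each image's piece list by append and writes it back with image[:] = out.
import Mathlib
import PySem

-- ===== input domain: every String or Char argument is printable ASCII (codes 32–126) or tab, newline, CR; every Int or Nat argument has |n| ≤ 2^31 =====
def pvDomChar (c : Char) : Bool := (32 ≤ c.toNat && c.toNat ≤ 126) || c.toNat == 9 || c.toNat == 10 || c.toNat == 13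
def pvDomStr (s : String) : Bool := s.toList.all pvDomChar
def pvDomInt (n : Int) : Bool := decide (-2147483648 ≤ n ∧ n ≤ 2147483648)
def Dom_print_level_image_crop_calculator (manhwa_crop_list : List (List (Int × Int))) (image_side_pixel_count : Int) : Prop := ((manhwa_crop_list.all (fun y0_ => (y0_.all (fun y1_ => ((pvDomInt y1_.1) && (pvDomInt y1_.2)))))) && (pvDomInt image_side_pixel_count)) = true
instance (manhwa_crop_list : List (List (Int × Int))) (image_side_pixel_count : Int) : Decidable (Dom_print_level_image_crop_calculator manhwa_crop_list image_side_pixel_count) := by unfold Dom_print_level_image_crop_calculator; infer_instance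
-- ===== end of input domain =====

-- ===== PORT A =====
-- B rewrites A's insert-into-the-list-being-iterated loop as an explicit split loop building a
-- fresh list per image (in Python B the in-place mutation is preserved via image[:] = out).
-- Both ports thread one Nat fuel (a totality guard only: on inputs where the Python versions return,
-- it is never exhausted; where they diverge, both ports stop identically when it runs out).
def pvFuel (l : List (List (Int × Int))) : Nat := (l.map (fun i => i.length)).sum * 17179869184 + 1

-- A's for-over-a-mutated-list with index i, rendered as a (done, todo) zipper: image[i] is todo's
-- head, image[i] = cut / insert(i+1, …) puts the first piece into done and the remainder at todo's head.
def pvLoopA (c : Int) : Nat → List (Int × Int) → List (Int × Int) → Int → (List (Int × Int) × Int × Nat)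
  | fuel, done, [], side => (done.reverse, side, fuel)
  | 0, done, todo, side => (done.reverse ++ todo, side, 0)
  | (f+1), done, (s, e) :: rest, side =>
    let side' := side + (e - s)
    if side' > c then
      pvLoopA c f ((s, s + c - side) :: done) ((s + c - side, e) :: rest) 0
    else
      pvLoopA c f ((s, e) :: done) rest side'

def pvGoA (c : Int) : Nat → Int → List (List (Int × Int)) → List (List (Int × Int))
  | _fuel, _side, [] => []
  | fuel, side, img :: imgs =>
    let r := pvLoopA c fuel [] img side
    r.1 :: pvGoA c r.2.2 r.2.1 imgs

def print_level_image_crop_calculator (manhwa_crop_list : List (List (Int × Int))) (image_side_pixel_count : Int) : List (List (Int × Int)) :=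
  pvGoA image_side_pixel_count (pvFuel manhwa_crop_list) 0 manhwa_crop_list

-- ===== PORT B =====
-- B's inner 'while True' split loop on one segment: returns its pieces, the running side length
-- and the fuel left.
def pvSplitSeg (c : Int) : Nat → Int → Int → Int → (List (Int × Int) × Int × Nat)
  | 0, s, e, side => ([(s, e)], side, 0)
  | (f+1), s, e, side =>
    let side' := side + (e - s)
    if side' > c then
      let r := pvSplitSeg c f (s + c - side) e 0
      ((s, s + c - side) :: r.1, r.2)
    else
      ([(s, e)], side', f)

-- B's for-over-the-original-segments loop collecting 'out' for one image.
def pvProcImg (c : Int) : Nat → Int → List (Int × Int) → (List (Int × Int) × Int × Nat)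
  | fuel, side, [] => ([], side, fuel)
  | fuel, side, (s, e) :: rest =>
    let r := pvSplitSeg c fuel s e side
    let q := pvProcImg c r.2.2 r.2.1 rest
    (r.1 ++ q.1, q.2)

def pvGoB (c : Int) : Nat → Int → List (List (Int × Int)) → List (List (Int × Int))
  | _fuel, _side, [] => []
  | fuel, side, img :: imgs =>
    let r := pvProcImg c fuel side img
    r.1 :: pvGoB c r.2.2 r.2.1 imgs

def print_level_image_crop_calculator_alt (manhwa_crop_list : List (List (Int × Int))) (image_side_pixel_count : Int) : List (List (Int × Int)) :=
  pvGoB image_side_pixel_count (pvFuel manhwa_crop_list) 0 manhwa_crop_list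

-- ===== PRECONDITION & SPEC =====
def Spec_print_level_image_crop_calculator (manhwa_crop_list : List (List (Int × Int))) (image_side_pixel_count : Int) (out : List (List (Int × Int))) : Prop := out = print_level_image_crop_calculator_alt manhwa_crop_list image_side_pixel_count
instance (manhwa_crop_list : List (List (Int × Int))) (image_side_pixel_count : Int) (out : List (List (Int × Int))) : Decidable (Spec_print_level_image_crop_calculator manhwa_crop_list image_side_pixel_count out) := by unfold Spec_print_level_image_crop_calculator; infer_instance

-- ===== CLAIM (what is proved, stated in full; the proofs are below) =====
def Claim_equal_print_level_image_crop_calculator : Prop := ∀ (manhwa_crop_list : List (List (Int × Int))) (image_side_pixel_count : Int), Dom_print_level_image_crop_calculator manhwa_crop_list image_side_pixel_count → Spec_print_level_image_crop_calculator manhwa_crop_list image_side_pixel_count (print_level_image_crop_calculator manhwa_crop_list image_side_pixel_count)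

-- ===== LEMMAS AND PROOFS =====
theorem pvProcImg_zero (c : Int) (todo : List (Int × Int)) (side : Int) :
    pvProcImg c 0 side todo = (todo, side, 0) := by
  induction todo with
  | nil => simp [pvProcImg]
  | cons p rest ih =>
    obtain ⟨s, e⟩ := p
    simp [pvProcImg, pvSplitSeg, ih]

theorem pvLoopA_eq_pvProcImg (c : Int) (fuel : Nat) :
    ∀ (todo done : List (Int × Int)) (side : Int),
      pvLoopA c fuel done todo side =
        (done.reverse ++ (pvProcImg c fuel side todo).1, (pvProcImg c fuel side todo).2) := by
  induction fuel with
  | zero =>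
    intro todo done side
    cases todo with
    | nil => simp [pvLoopA, pvProcImg]
    | cons p rest => obtain ⟨s, e⟩ := p; simp [pvLoopA, pvProcImg_zero]
  | succ f ih =>
    intro todo done side
    cases todo with
    | nil => simp [pvLoopA, pvProcImg]
    | cons p rest =>
      obtain ⟨s, e⟩ := p
      by_cases h : side + (e - s) > c
      · simp only [pvLoopA, pvProcImg, pvSplitSeg, if_pos h, ih]
        simp
      · simp only [pvLoopA, pvProcImg, pvSplitSeg, if_neg h, ih]
        simp

theorem pvGoA_eq_pvGoB (c : Int) (imgs : List (List (Int × Int))) :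
    ∀ (fuel : Nat) (side : Int), pvGoA c fuel side imgs = pvGoB c fuel side imgs := by
  induction imgs with
  | nil => intro fuel side; rfl
  | cons img rest ih =>
    intro fuel side
    simp [pvGoA, pvGoB, pvLoopA_eq_pvProcImg, ih]

-- ===== VERDICT (by name: the statement is the Claim_ definition above) =====
theorem print_level_image_crop_calculator_spec : Claim_equal_print_level_image_crop_calculator := by
  intro l c _
  unfold Spec_print_level_image_crop_calculator print_level_image_crop_calculator print_level_image_crop_calculator_alt
  exact pvGoA_eq_pvGoB c l (pvFuel l) 0
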